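-- pv_equiv track=rewrite | github.com/VenkataRamanaRao5/weekly-contests | WEEK4/SumOfLargestDigits/script.py | sumOfLargestDigits
-- ===== SOURCE A (Python) =====
-- def sumOfLargestDigits(nums, N):
--     total = 0
--     for num in nums:
--         max_digit = 0
--         if num == 0:
--             max_digit = 0
--         else:
--             while num > 0:
--                 max_digit = max(max_digit, num % 10)
--                 if max_digit == 9:  # early stop
--                     break
--                 num //= 10
--         total += max_digit
--     return total
-- ===== SOURCE B (Python) =====
-- def sumOfLargestDigits(nums, N):
--     # one generator pass: max digit via the decimal string; non-positive nums contribute 0 (A's loop never runs for them)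
--     return sum(max(ord(c) - 48 for c in str(num)) if num > 0 else 0 for num in nums)
-- ===== Notes on version B (the rewrite author's own statement) =====
-- stated objective: idiomatic
-- what changed: B replaces A's explicit accumulator loop with div/mod digit extraction and an early break by a single generator expression summing, per number, the max over the decimal string's digit characters (non-positive numbers contribute 0, as A's loop never runs for them).
import Mathlib
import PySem

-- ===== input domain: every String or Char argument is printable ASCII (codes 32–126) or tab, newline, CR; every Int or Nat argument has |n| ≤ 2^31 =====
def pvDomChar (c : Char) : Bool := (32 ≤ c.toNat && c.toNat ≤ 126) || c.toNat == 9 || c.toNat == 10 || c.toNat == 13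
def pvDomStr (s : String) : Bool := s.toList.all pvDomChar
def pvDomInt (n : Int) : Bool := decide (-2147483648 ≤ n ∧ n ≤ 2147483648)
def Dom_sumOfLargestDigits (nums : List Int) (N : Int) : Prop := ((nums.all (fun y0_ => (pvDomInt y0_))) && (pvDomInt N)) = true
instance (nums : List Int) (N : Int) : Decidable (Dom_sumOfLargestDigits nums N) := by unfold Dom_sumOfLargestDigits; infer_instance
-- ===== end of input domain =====

-- B replaces A's hand-rolled digit-extraction while loop by taking the max over the decimal string's digit characters (same cost, more idiomatic).

-- ===== PORT A =====
-- A's inner `while num > 0` loop with the `max_digit == 9` early break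
def maxDigitLoop (num md : Int) : Int :=
  if h : 0 < num then
    let md' := max md (PySem.Int.mod num 10)
    if md' = 9 then md'
    else maxDigitLoop (PySem.Int.floordiv num 10) md'
  else md
termination_by num.toNat
decreasing_by
  rw [PySem.Int.floordiv_eq_ediv_of_pos (by omega : (0:Int) < 10)]
  omega

def sumOfLargestDigits (nums : List Int) (N : Int) : Int :=
  nums.foldl (fun total num => total + (if num = 0 then 0 else maxDigitLoop num 0)) 0

-- ===== PORT B =====
-- Python's max(...) over a (nonempty, by the num > 0 guard) generator
def pyMaxList (l : List Int) : Int :=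
  match l with
  | [] => 0  -- unreachable under the num > 0 guard (str(num) is nonempty)
  | h :: t => t.foldl max h

def sumOfLargestDigits_alt (nums : List Int) (N : Int) : Int :=
  (nums.map (fun num =>
    if 0 < num then pyMaxList ((PySem.Int.toChars num).map (fun c => (c.toNat : Int) - 48))
    else 0)).sum

-- ===== PRECONDITION & SPEC =====
def Spec_sumOfLargestDigits (nums : List Int) (N : Int) (out : Int) : Prop := out = sumOfLargestDigits_alt nums N
instance (nums : List Int) (N : Int) (out : Int) : Decidable (Spec_sumOfLargestDigits nums N out) := by unfold Spec_sumOfLargestDigits; infer_instance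

-- ===== CLAIM (what is proved, stated in full; the proofs are below) =====
def Claim_equal_sumOfLargestDigits : Prop := ∀ (nums : List Int) (N : Int), Dom_sumOfLargestDigits nums N → Spec_sumOfLargestDigits nums N (sumOfLargestDigits nums N)

-- ===== LEMMAS AND PROOFS =====

-- the mathematical max digit of a natural number
def MD (n : Nat) : Int :=
  if 0 < n then max ((n % 10 : Nat) : Int) (MD (n / 10)) else 0
termination_by n
decreasing_by omega

theorem MD_zero : MD 0 = 0 := by unfold MD; simp

theorem MD_pos_eq {n : Nat} (h : 0 < n) : MD n = max ((n % 10 : Nat) : Int) (MD (n / 10)) := by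
  rw [MD]; simp [h]

theorem MD_nonneg (n : Nat) : 0 ≤ MD n := by
  induction n using Nat.strong_induction_on with
  | _ n ih =>
    by_cases h : 0 < n
    · rw [MD_pos_eq h]
      have := ih (n / 10) (by omega)
      omega
    · simp [show n = 0 by omega, MD_zero]

theorem MD_le_nine (n : Nat) : MD n ≤ 9 := by
  induction n using Nat.strong_induction_on with
  | _ n ih =>
    by_cases h : 0 < n
    · rw [MD_pos_eq h]
      have := ih (n / 10) (by omega)
      have : n % 10 < 10 := Nat.mod_lt _ (by omega)
      omega
    · simp [show n = 0 by omega, MD_zero]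

-- A's loop computes max md (MD n)
theorem maxDigitLoop_eq (k : Nat) : ∀ (num md : Int), num.toNat = k → 0 ≤ num → 0 ≤ md → md ≤ 9 →
    maxDigitLoop num md = max md (MD num.toNat) := by
  induction k using Nat.strong_induction_on with
  | _ k ih =>
    intro num md hk hnum hmd0 hmd9
    rw [maxDigitLoop]
    by_cases h : 0 < num
    · simp only [h, dif_pos]
      have h10 : (0:Int) < 10 := by omega
      rw [PySem.Int.mod_eq_emod_of_pos h10, PySem.Int.floordiv_eq_ediv_of_pos h10]
      have hnn : num = (num.toNat : Int) := by omega
      have hmod : num % 10 = ((num.toNat % 10 : Nat) : Int) := by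
        omega
      have hdiv : num / 10 = ((num.toNat / 10 : Nat) : Int) := by
        omega
      have hMDpos := MD_pos_eq (show 0 < num.toNat by omega)
      have hmodle : ((num.toNat % 10 : Nat) : Int) ≤ MD num.toNat := by
        rw [hMDpos]; exact le_max_left _ _
      have hMD9 := MD_le_nine num.toNat
      have hMDd0 := MD_nonneg (num.toNat / 10)
      have hmodlt : num.toNat % 10 < 10 := Nat.mod_lt _ (by omega)
      by_cases h9 : max md (num % 10) = 9
      · simp only [h9, if_pos]
        rw [hmod] at h9
        omega
      · simp only [h9, if_neg, not_false_iff]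
        rw [ih ((num / 10).toNat) (by rw [hdiv]; omega) _ _ rfl (by rw [hdiv]; omega)
            (by rw [hmod]; omega) (by rw [hmod]; omega)]
        have : (num / 10).toNat = num.toNat / 10 := by rw [hdiv]; omega
        rw [this, hmod, hMDpos]
        rw [max_assoc]
    · simp only [h, dif_neg, not_false_iff]
      have : num.toNat = 0 := by omega
      rw [this, MD_zero]
      omega

-- pyMaxList over an appended element
theorem pyMaxList_append (l : List Int) (d : Int) (h : l ≠ []) :
    pyMaxList (l ++ [d]) = max (pyMaxList l) d := by
  match l with
  | [] => exact absurd rfl h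
  | a :: t => simp [pyMaxList, List.foldl_append]

-- Nat.toDigitsCore characterised by Nat.digits
theorem toDigitsCore_eq (f : Nat) : ∀ (n : Nat) (ds : List Char), 0 < n → n ≤ f →
    Nat.toDigitsCore 10 f n ds = ((Nat.digits 10 n).map Nat.digitChar).reverse ++ ds := by
  induction f with
  | zero => intro n ds h hf; omega
  | succ f ihf =>
    intro n ds h hf
    simp only [Nat.toDigitsCore]
    rw [Nat.digits_def' (by omega : 1 < 10) h]
    by_cases hd : n / 10 = 0
    · simp [hd, Nat.digits_zero]
    · simp only [hd, if_neg, not_false_iff]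
      rw [ihf (n / 10) _ (by omega) (by omega)]
      simp

-- digitChar's code for a digit
theorem digitChar_toNat {d : Nat} (h : d < 10) : ((Nat.digitChar d).toNat : Int) - 48 = (d : Int) := by
  interval_cases d <;> decide

-- B's per-element value equals MD
theorem pyMax_digits (n : Nat) : 0 < n →
    pyMaxList (((Nat.digits 10 n).map Nat.digitChar).reverse.map (fun c => (c.toNat : Int) - 48)) = MD n := by
  induction n using Nat.strong_induction_on with
  | _ n ih =>
    intro h
    rw [Nat.digits_def' (by omega : 1 < 10) h]
    have hmodlt : n % 10 < 10 := Nat.mod_lt _ (by omega)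
    by_cases hd : n / 10 = 0
    · rw [hd]
      simp only [Nat.digits_zero, List.map_cons, List.map_nil, List.reverse_cons,
        List.reverse_nil, List.nil_append]
      simp [pyMaxList, digitChar_toNat hmodlt, MD_pos_eq h, hd, MD_zero]
      omega
    · simp only [List.map_cons, List.reverse_cons, List.map_append, List.map_cons, List.map_nil]
      rw [pyMaxList_append _ _ (by
        simp only [ne_eq, List.map_eq_nil_iff, List.reverse_eq_nil_iff, List.map_eq_nil_iff]
        exact Nat.digits_ne_nil_iff_ne_zero.mpr hd)]
      rw [ih (n / 10) (by omega) (by omega)]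
      rw [digitChar_toNat hmodlt, MD_pos_eq h, max_comm]

-- the two per-element computations agree
theorem elem_eq (num : Int) :
    (if num = 0 then 0 else maxDigitLoop num 0) =
    (if 0 < num then pyMaxList ((PySem.Int.toChars num).map (fun c => (c.toNat : Int) - 48)) else 0) := by
  by_cases hp : 0 < num
  · simp only [hp, if_pos, show num ≠ 0 by omega, if_neg, not_false_iff]
    rw [maxDigitLoop_eq num.toNat num 0 rfl (by omega) (by omega) (by omega)]
    have hn : 0 < num.toNat := by omega
    unfold PySem.Int.toChars
    simp only [show ¬ num < 0 by omega, if_neg, not_false_iff]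
    unfold Nat.toDigits
    rw [toDigitsCore_eq (num.toNat + 1) num.toNat [] hn (by omega)]
    rw [List.append_nil, pyMax_digits num.toNat hn]
    have := MD_nonneg num.toNat
    omega
  · by_cases hz : num = 0
    · simp [hz]
    · simp only [hz, if_neg, not_false_iff, hp]
      rw [maxDigitLoop]
      simp [hp]

-- ===== VERDICT (by name: the statement is the Claim_ definition above) =====
theorem sumOfLargestDigits_spec : Claim_equal_sumOfLargestDigits := by
  intro nums N _
  unfold Spec_sumOfLargestDigits sumOfLargestDigits sumOfLargestDigits_alt
  rw [PySem.List.foldl_add nums (fun num => if num = 0 then 0 else maxDigitLoop num 0) 0]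
  rw [zero_add]
  congr 1
  exact List.map_congr_left (fun num _ => elem_eq num)
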